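-- pv_equiv track=rewrite | github.com/cajumdip/derp | cojumpendium_scraper/extractors/content.py | _get_media_type_from_url
-- ===== SOURCE A (Python) =====
-- def _get_media_type_from_url(url: str) -> str:
--     """Get media type from URL extension.
--
--     Args:
--         url: URL to check
--
--     Returns:
--         Media type string
--     """
--     url_lower = url.lower()
--
--     if any(url_lower.endswith(ext) for ext in ['.jpg', '.jpeg', '.png', '.gif', '.bmp', '.webp']):
--         return 'image'
--     elif any(url_lower.endswith(ext) for ext in ['.mp4', '.avi', '.flv', '.wmv', '.mov', '.webm']):
--         return 'video'
--     elif any(url_lower.endswith(ext) for ext in ['.mp3', '.wav', '.ogg', '.flac', '.m4a', '.wma']):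
--         return 'audio'
--     elif url_lower.endswith('.swf'):
--         return 'flash'
--     else:
--         return 'unknown'
-- ===== SOURCE B (Python) =====
-- _EXT_TO_TYPE = {
--     'jpg': 'image', 'jpeg': 'image', 'png': 'image', 'gif': 'image',
--     'bmp': 'image', 'webp': 'image',
--     'mp4': 'video', 'avi': 'video', 'flv': 'video', 'wmv': 'video',
--     'mov': 'video', 'webm': 'video',
--     'mp3': 'audio', 'wav': 'audio', 'ogg': 'audio', 'flac': 'audio',
--     'm4a': 'audio', 'wma': 'audio',
--     'swf': 'flash',
-- }
--
--
-- def _get_media_type_from_url(url: str) -> str: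
--     parts = url.lower().rsplit('.', 1)
--     if len(parts) == 1:
--         return 'unknown'
--     return _EXT_TO_TYPE.get(parts[-1], 'unknown')
-- ===== Notes on version B (the rewrite author's own statement) =====
-- stated objective: idiomatic
-- what changed: Replaces A's four any()-scans testing 19 dotted suffixes with endswith by extracting the extension once (split at the last dot) and doing a single dict lookup.
import Mathlib
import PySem

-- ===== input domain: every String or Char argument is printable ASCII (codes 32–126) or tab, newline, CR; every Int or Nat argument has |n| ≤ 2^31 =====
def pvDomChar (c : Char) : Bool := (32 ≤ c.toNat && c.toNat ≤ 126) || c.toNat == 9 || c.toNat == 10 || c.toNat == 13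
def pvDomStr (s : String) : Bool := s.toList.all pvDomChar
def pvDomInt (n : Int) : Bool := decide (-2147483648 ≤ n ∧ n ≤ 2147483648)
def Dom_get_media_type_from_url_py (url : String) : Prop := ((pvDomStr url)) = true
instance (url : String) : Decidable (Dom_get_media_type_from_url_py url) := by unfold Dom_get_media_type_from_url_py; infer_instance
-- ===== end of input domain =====

-- B replaces four any(endswith) scans over 19 dotted suffixes by one split at the last dot and a single dict lookup (idiomatic).


-- ===== PORT A =====
def get_media_type_from_url_py (url : String) : String :=
  let url_lower := PySem.Str.lower url
  if ([".jpg", ".jpeg", ".png", ".gif", ".bmp", ".webp"] : List String).any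
      (fun ext => PySem.Str.endswith url_lower ext) then "image"
  else if ([".mp4", ".avi", ".flv", ".wmv", ".mov", ".webm"] : List String).any
      (fun ext => PySem.Str.endswith url_lower ext) then "video"
  else if ([".mp3", ".wav", ".ogg", ".flac", ".m4a", ".wma"] : List String).any
      (fun ext => PySem.Str.endswith url_lower ext) then "audio"
  else if PySem.Str.endswith url_lower ".swf" then "flash"
  else "unknown"

-- ===== PORT B =====
-- hand port of str.rsplit(sep, 1) for a one-character sep, exact: either the whole
-- string (no occurrence) or the parts before and after the LAST occurrence of c.
def rsplitLast1 (s : List Char) (c : Char) : List (List Char) :=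
  if s.contains c then
    [((s.reverse.dropWhile (· ≠ c)).tail).reverse, (s.reverse.takeWhile (· ≠ c)).reverse]
  else [s]

def extToType : PySem.Dict String String :=
  PySem.Dict.ofList
    [("jpg", "image"), ("jpeg", "image"), ("png", "image"), ("gif", "image"),
     ("bmp", "image"), ("webp", "image"),
     ("mp4", "video"), ("avi", "video"), ("flv", "video"), ("wmv", "video"),
     ("mov", "video"), ("webm", "video"),
     ("mp3", "audio"), ("wav", "audio"), ("ogg", "audio"), ("flac", "audio"),
     ("m4a", "audio"), ("wma", "audio"),
     ("swf", "flash")]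

def get_media_type_from_url_py_alt (url : String) : String :=
  let parts := rsplitLast1 (PySem.Str.lower url).toList '.'
  if parts.length == 1 then "unknown"
  else extToType.getD (String.ofList (PySem.List.pyGetD parts (-1) [])) "unknown"

-- ===== PRECONDITION & SPEC =====
def Spec_get_media_type_from_url_py (url : String) (out : String) : Prop := out = get_media_type_from_url_py_alt url
instance (url : String) (out : String) : Decidable (Spec_get_media_type_from_url_py url out) := by unfold Spec_get_media_type_from_url_py; infer_instance

-- ===== CLAIM (what is proved, stated in full; the proofs are below) =====
def Claim_equal_get_media_type_from_url_py : Prop := ∀ (url : String), Dom_get_media_type_from_url_py url → Spec_get_media_type_from_url_py url (get_media_type_from_url_py url)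

-- ===== LEMMAS AND PROOFS =====

-- '.'-free prefix followed by '.' is exactly the takeWhile part
lemma takeWhile_dotfree_append (e t : List Char) (he : '.' ∉ e) :
    (e ++ '.' :: t).takeWhile (· ≠ '.') = e := by
  induction e with
  | nil => simp
  | cons a e ih =>
      have ha : a ≠ '.' := by intro h; exact he (h ▸ List.mem_cons_self)
      have he' : '.' ∉ e := fun h => he (List.mem_cons_of_mem _ h)
      rw [List.cons_append, List.takeWhile_cons, if_pos (by simp [ha]), ih he']

lemma exists_split_of_mem_dot (R : List Char) (hd : '.' ∈ R) :
    ∃ t, R = R.takeWhile (· ≠ '.') ++ '.' :: t := by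
  induction R with
  | nil => cases hd
  | cons a R ih =>
      by_cases ha : a = '.'
      · subst ha; exact ⟨R, by simp⟩
      · have hd' : '.' ∈ R := by
          cases hd with
          | head => exact absurd rfl ha
          | tail _ h => exact h
        obtain ⟨t, ht⟩ := ih hd'
        exact ⟨t, by simpa [List.takeWhile_cons, ha] using congrArg (a :: ·) ht⟩

lemma prefix_iff_takeWhile (R e : List Char) (he : '.' ∉ e) (hd : '.' ∈ R) :
    (e ++ ['.'] <+: R) ↔ R.takeWhile (· ≠ '.') = e := by
  constructor
  · rintro ⟨t, ht⟩
    subst ht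
    simpa using takeWhile_dotfree_append e t he
  · intro h
    obtain ⟨t, ht⟩ := exists_split_of_mem_dot R hd
    exact ⟨t, by rw [ht, h]; simp⟩

lemma endswith_dot_ext (s k : List Char) (hk : '.' ∉ k) (hd : '.' ∈ s) :
    PySem.Chars.endswith s ('.' :: k) = decide ((s.reverse.takeWhile (· ≠ '.')).reverse = k) := by
  have h1 : PySem.Chars.endswith s ('.' :: k) = true ↔ ('.' :: k) <:+ s :=
    PySem.Chars.endswith_iff s ('.' :: k)
  have h2 : ('.' :: k) <:+ s ↔ k.reverse ++ ['.'] <+: s.reverse := by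
    rw [← List.reverse_prefix]; simp
  have h3 : '.' ∉ k.reverse := by simpa using hk
  have h4 : '.' ∈ s.reverse := by simpa using hd
  have h5 := prefix_iff_takeWhile s.reverse k.reverse h3 h4
  have h6 : (s.reverse.takeWhile (· ≠ '.') = k.reverse) ↔
      ((s.reverse.takeWhile (· ≠ '.')).reverse = k) := by
    constructor
    · intro h; rw [h]; simp
    · intro h; rw [← h]; simp
  by_cases hend : PySem.Chars.endswith s ('.' :: k) = true
  · rw [hend]
    symm
    simpa using (h6.mp (h5.mp (h2.mp (h1.mp hend))))
  · have : PySem.Chars.endswith s ('.' :: k) = false := by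
      cases hfb : PySem.Chars.endswith s ('.' :: k) with
      | true => exact absurd hfb hend
      | false => rfl
    rw [this]
    symm
    simp only [decide_eq_false_iff_not]
    intro h
    exact hend (h1.mpr (h2.mpr (h5.mpr (h6.mpr h))))

lemma endswith_of_no_dot (s k : List Char) (hd : '.' ∉ s) :
    PySem.Chars.endswith s ('.' :: k) = false := by
  cases hfb : PySem.Chars.endswith s ('.' :: k) with
  | false => rfl
  | true =>
      exfalso
      have := (PySem.Chars.endswith_iff s ('.' :: k)).mp hfb
      exact hd (this.subset List.mem_cons_self)

-- ===== VERDICT (by name: the statement is the Claim_ definition above) =====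
theorem get_media_type_from_url_py_spec : Claim_equal_get_media_type_from_url_py := by
  intro url _
  unfold Spec_get_media_type_from_url_py get_media_type_from_url_py
  set s : List Char := (PySem.Str.lower url).toList with hs
  by_cases hd : '.' ∈ s
  · have hc : s.contains '.' = true := by simpa using hd
    set e : List Char := (s.reverse.takeWhile (· ≠ '.')).reverse with hedef
    have hBval : get_media_type_from_url_py_alt url = extToType.getD (String.ofList e) "unknown" := by
      unfold get_media_type_from_url_py_alt rsplitLast1
      simp only [← hs, hc, if_true]
      rfl
    rw [hBval]
    have hrw : ∀ k : List Char, '.' ∉ k →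
        PySem.Chars.endswith s ('.' :: k) = decide (e = k) := by
      intro k hk
      rw [endswith_dot_ext s k hk hd, hedef]
    have h_jpg : PySem.Str.endswith (PySem.Str.lower url) ".jpg" = decide (e = ['j', 'p', 'g']) := by
      rw [PySem.Str.endswith_eq]; exact hrw ['j', 'p', 'g'] (by decide)
    have h_jpeg : PySem.Str.endswith (PySem.Str.lower url) ".jpeg" = decide (e = ['j', 'p', 'e', 'g']) := by
      rw [PySem.Str.endswith_eq]; exact hrw ['j', 'p', 'e', 'g'] (by decide)
    have h_png : PySem.Str.endswith (PySem.Str.lower url) ".png" = decide (e = ['p', 'n', 'g']) := by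
      rw [PySem.Str.endswith_eq]; exact hrw ['p', 'n', 'g'] (by decide)
    have h_gif : PySem.Str.endswith (PySem.Str.lower url) ".gif" = decide (e = ['g', 'i', 'f']) := by
      rw [PySem.Str.endswith_eq]; exact hrw ['g', 'i', 'f'] (by decide)
    have h_bmp : PySem.Str.endswith (PySem.Str.lower url) ".bmp" = decide (e = ['b', 'm', 'p']) := by
      rw [PySem.Str.endswith_eq]; exact hrw ['b', 'm', 'p'] (by decide)
    have h_webp : PySem.Str.endswith (PySem.Str.lower url) ".webp" = decide (e = ['w', 'e', 'b', 'p']) := by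
      rw [PySem.Str.endswith_eq]; exact hrw ['w', 'e', 'b', 'p'] (by decide)
    have h_mp4 : PySem.Str.endswith (PySem.Str.lower url) ".mp4" = decide (e = ['m', 'p', '4']) := by
      rw [PySem.Str.endswith_eq]; exact hrw ['m', 'p', '4'] (by decide)
    have h_avi : PySem.Str.endswith (PySem.Str.lower url) ".avi" = decide (e = ['a', 'v', 'i']) := by
      rw [PySem.Str.endswith_eq]; exact hrw ['a', 'v', 'i'] (by decide)
    have h_flv : PySem.Str.endswith (PySem.Str.lower url) ".flv" = decide (e = ['f', 'l', 'v']) := by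
      rw [PySem.Str.endswith_eq]; exact hrw ['f', 'l', 'v'] (by decide)
    have h_wmv : PySem.Str.endswith (PySem.Str.lower url) ".wmv" = decide (e = ['w', 'm', 'v']) := by
      rw [PySem.Str.endswith_eq]; exact hrw ['w', 'm', 'v'] (by decide)
    have h_mov : PySem.Str.endswith (PySem.Str.lower url) ".mov" = decide (e = ['m', 'o', 'v']) := by
      rw [PySem.Str.endswith_eq]; exact hrw ['m', 'o', 'v'] (by decide)
    have h_webm : PySem.Str.endswith (PySem.Str.lower url) ".webm" = decide (e = ['w', 'e', 'b', 'm']) := by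
      rw [PySem.Str.endswith_eq]; exact hrw ['w', 'e', 'b', 'm'] (by decide)
    have h_mp3 : PySem.Str.endswith (PySem.Str.lower url) ".mp3" = decide (e = ['m', 'p', '3']) := by
      rw [PySem.Str.endswith_eq]; exact hrw ['m', 'p', '3'] (by decide)
    have h_wav : PySem.Str.endswith (PySem.Str.lower url) ".wav" = decide (e = ['w', 'a', 'v']) := by
      rw [PySem.Str.endswith_eq]; exact hrw ['w', 'a', 'v'] (by decide)
    have h_ogg : PySem.Str.endswith (PySem.Str.lower url) ".ogg" = decide (e = ['o', 'g', 'g']) := by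
      rw [PySem.Str.endswith_eq]; exact hrw ['o', 'g', 'g'] (by decide)
    have h_flac : PySem.Str.endswith (PySem.Str.lower url) ".flac" = decide (e = ['f', 'l', 'a', 'c']) := by
      rw [PySem.Str.endswith_eq]; exact hrw ['f', 'l', 'a', 'c'] (by decide)
    have h_m4a : PySem.Str.endswith (PySem.Str.lower url) ".m4a" = decide (e = ['m', '4', 'a']) := by
      rw [PySem.Str.endswith_eq]; exact hrw ['m', '4', 'a'] (by decide)
    have h_wma : PySem.Str.endswith (PySem.Str.lower url) ".wma" = decide (e = ['w', 'm', 'a']) := by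
      rw [PySem.Str.endswith_eq]; exact hrw ['w', 'm', 'a'] (by decide)
    have h_swf : PySem.Str.endswith (PySem.Str.lower url) ".swf" = decide (e = ['s', 'w', 'f']) := by
      rw [PySem.Str.endswith_eq]; exact hrw ['s', 'w', 'f'] (by decide)
    simp only [List.any_cons, List.any_nil, Bool.or_false, h_jpg, h_jpeg, h_png, h_gif, h_bmp, h_webp, h_mp4, h_avi, h_flv, h_wmv, h_mov, h_webm, h_mp3, h_wav, h_ogg, h_flac, h_m4a, h_wma, h_swf]
    by_cases e1 : e = ['j', 'p', 'g']
    · rw [e1]; decide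
    by_cases e2 : e = ['j', 'p', 'e', 'g']
    · rw [e2]; decide
    by_cases e3 : e = ['p', 'n', 'g']
    · rw [e3]; decide
    by_cases e4 : e = ['g', 'i', 'f']
    · rw [e4]; decide
    by_cases e5 : e = ['b', 'm', 'p']
    · rw [e5]; decide
    by_cases e6 : e = ['w', 'e', 'b', 'p']
    · rw [e6]; decide
    by_cases e7 : e = ['m', 'p', '4']
    · rw [e7]; decide
    by_cases e8 : e = ['a', 'v', 'i']
    · rw [e8]; decide
    by_cases e9 : e = ['f', 'l', 'v']
    · rw [e9]; decide
    by_cases e10 : e = ['w', 'm', 'v']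
    · rw [e10]; decide
    by_cases e11 : e = ['m', 'o', 'v']
    · rw [e11]; decide
    by_cases e12 : e = ['w', 'e', 'b', 'm']
    · rw [e12]; decide
    by_cases e13 : e = ['m', 'p', '3']
    · rw [e13]; decide
    by_cases e14 : e = ['w', 'a', 'v']
    · rw [e14]; decide
    by_cases e15 : e = ['o', 'g', 'g']
    · rw [e15]; decide
    by_cases e16 : e = ['f', 'l', 'a', 'c']
    · rw [e16]; decide
    by_cases e17 : e = ['m', '4', 'a']
    · rw [e17]; decide
    by_cases e18 : e = ['w', 'm', 'a']
    · rw [e18]; decide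
    by_cases e19 : e = ['s', 'w', 'f']
    · rw [e19]; decide
    have hnotkey : extToType.contains (String.ofList e) = false := by
      rw [PySem.Dict.contains_eq_decide_mem_keys]
      have hkeys : extToType.keys = ["jpg", "jpeg", "png", "gif", "bmp", "webp", "mp4", "avi", "flv", "wmv", "mov", "webm", "mp3", "wav", "ogg", "flac", "m4a", "wma", "swf"] := by decide
      rw [hkeys]
      simp only [List.mem_cons, List.not_mem_nil, or_false, decide_eq_false_iff_not]
      push Not
      exact ⟨fun hh => e1 (by simpa using congrArg String.toList hh),
        fun hh => e2 (by simpa using congrArg String.toList hh),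
        fun hh => e3 (by simpa using congrArg String.toList hh),
        fun hh => e4 (by simpa using congrArg String.toList hh),
        fun hh => e5 (by simpa using congrArg String.toList hh),
        fun hh => e6 (by simpa using congrArg String.toList hh),
        fun hh => e7 (by simpa using congrArg String.toList hh),
        fun hh => e8 (by simpa using congrArg String.toList hh),
        fun hh => e9 (by simpa using congrArg String.toList hh),
        fun hh => e10 (by simpa using congrArg String.toList hh),
        fun hh => e11 (by simpa using congrArg String.toList hh),
        fun hh => e12 (by simpa using congrArg String.toList hh),
        fun hh => e13 (by simpa using congrArg String.toList hh),
        fun hh => e14 (by simpa using congrArg String.toList hh),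
        fun hh => e15 (by simpa using congrArg String.toList hh),
        fun hh => e16 (by simpa using congrArg String.toList hh),
        fun hh => e17 (by simpa using congrArg String.toList hh),
        fun hh => e18 (by simpa using congrArg String.toList hh),
        fun hh => e19 (by simpa using congrArg String.toList hh)⟩
    rw [PySem.Dict.getD_of_not_contains extToType "unknown" hnotkey]
    simp [e1, e2, e3, e4, e5, e6, e7, e8, e9, e10, e11, e12, e13, e14, e15, e16, e17, e18, e19]
  · have hc : s.contains '.' = false := by
      simpa using hd
    have hBval : get_media_type_from_url_py_alt url = "unknown" := by
      unfold get_media_type_from_url_py_alt rsplitLast1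
      simp only [← hs, hc]
      rfl
    rw [hBval]
    have h_jpg : PySem.Str.endswith (PySem.Str.lower url) ".jpg" = false := by
      rw [PySem.Str.endswith_eq]; exact endswith_of_no_dot s ['j', 'p', 'g'] hd
    have h_jpeg : PySem.Str.endswith (PySem.Str.lower url) ".jpeg" = false := by
      rw [PySem.Str.endswith_eq]; exact endswith_of_no_dot s ['j', 'p', 'e', 'g'] hd
    have h_png : PySem.Str.endswith (PySem.Str.lower url) ".png" = false := by
      rw [PySem.Str.endswith_eq]; exact endswith_of_no_dot s ['p', 'n', 'g'] hd
    have h_gif : PySem.Str.endswith (PySem.Str.lower url) ".gif" = false := by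
      rw [PySem.Str.endswith_eq]; exact endswith_of_no_dot s ['g', 'i', 'f'] hd
    have h_bmp : PySem.Str.endswith (PySem.Str.lower url) ".bmp" = false := by
      rw [PySem.Str.endswith_eq]; exact endswith_of_no_dot s ['b', 'm', 'p'] hd
    have h_webp : PySem.Str.endswith (PySem.Str.lower url) ".webp" = false := by
      rw [PySem.Str.endswith_eq]; exact endswith_of_no_dot s ['w', 'e', 'b', 'p'] hd
    have h_mp4 : PySem.Str.endswith (PySem.Str.lower url) ".mp4" = false := by
      rw [PySem.Str.endswith_eq]; exact endswith_of_no_dot s ['m', 'p', '4'] hd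
    have h_avi : PySem.Str.endswith (PySem.Str.lower url) ".avi" = false := by
      rw [PySem.Str.endswith_eq]; exact endswith_of_no_dot s ['a', 'v', 'i'] hd
    have h_flv : PySem.Str.endswith (PySem.Str.lower url) ".flv" = false := by
      rw [PySem.Str.endswith_eq]; exact endswith_of_no_dot s ['f', 'l', 'v'] hd
    have h_wmv : PySem.Str.endswith (PySem.Str.lower url) ".wmv" = false := by
      rw [PySem.Str.endswith_eq]; exact endswith_of_no_dot s ['w', 'm', 'v'] hd
    have h_mov : PySem.Str.endswith (PySem.Str.lower url) ".mov" = false := by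
      rw [PySem.Str.endswith_eq]; exact endswith_of_no_dot s ['m', 'o', 'v'] hd
    have h_webm : PySem.Str.endswith (PySem.Str.lower url) ".webm" = false := by
      rw [PySem.Str.endswith_eq]; exact endswith_of_no_dot s ['w', 'e', 'b', 'm'] hd
    have h_mp3 : PySem.Str.endswith (PySem.Str.lower url) ".mp3" = false := by
      rw [PySem.Str.endswith_eq]; exact endswith_of_no_dot s ['m', 'p', '3'] hd
    have h_wav : PySem.Str.endswith (PySem.Str.lower url) ".wav" = false := by
      rw [PySem.Str.endswith_eq]; exact endswith_of_no_dot s ['w', 'a', 'v'] hd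
    have h_ogg : PySem.Str.endswith (PySem.Str.lower url) ".ogg" = false := by
      rw [PySem.Str.endswith_eq]; exact endswith_of_no_dot s ['o', 'g', 'g'] hd
    have h_flac : PySem.Str.endswith (PySem.Str.lower url) ".flac" = false := by
      rw [PySem.Str.endswith_eq]; exact endswith_of_no_dot s ['f', 'l', 'a', 'c'] hd
    have h_m4a : PySem.Str.endswith (PySem.Str.lower url) ".m4a" = false := by
      rw [PySem.Str.endswith_eq]; exact endswith_of_no_dot s ['m', '4', 'a'] hd
    have h_wma : PySem.Str.endswith (PySem.Str.lower url) ".wma" = false := by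
      rw [PySem.Str.endswith_eq]; exact endswith_of_no_dot s ['w', 'm', 'a'] hd
    have h_swf : PySem.Str.endswith (PySem.Str.lower url) ".swf" = false := by
      rw [PySem.Str.endswith_eq]; exact endswith_of_no_dot s ['s', 'w', 'f'] hd
    simp only [List.any_cons, List.any_nil, Bool.or_false, h_jpg, h_jpeg, h_png, h_gif, h_bmp, h_webp, h_mp4, h_avi, h_flv, h_wmv, h_mov, h_webm, h_mp3, h_wav, h_ogg, h_flac, h_m4a, h_wma, h_swf]
    rfl
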